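-- pv_equiv track=rewrite | github.com/HARPLab/augmented_taxi | run_simulations_sensitivity.py | get_sim_conditions
-- ===== SOURCE A (Python) =====
-- def get_sim_conditions(team_composition_list, dem_strategy_list, sampling_condition_list, N_runs, run_start_id):
--     sim_conditions = []
--     team_comp_id = 0
--     dem_strategy_id = 0
--     sampling_cond_id = 0
--
--     for run_id in range(run_start_id, run_start_id+N_runs):
--
--         team_composition_for_run = team_composition_list[team_comp_id]
--         dem_strategy = dem_strategy_list[dem_strategy_id]
--         sampling_cond = sampling_condition_list[sampling_cond_id]
--         sim_conditions.append([run_id, team_composition_for_run, dem_strategy, sampling_cond])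
--
--         # update sim params for next run
--         if dem_strategy_id == len(dem_strategy_list)-1:
--             dem_strategy_id = 0
--         else:
--             dem_strategy_id += 1
--
--         if run_id % len(dem_strategy_list) == (len(dem_strategy_list)-1):
--             if team_comp_id == len(team_composition_list)-1:
--                 team_comp_id = 0
--             else:
--                 team_comp_id += 1
--
--         if run_id % len(dem_strategy_list) == (len(dem_strategy_list)-1):
--             if sampling_cond_id == len(sampling_condition_list)-1:
--                 sampling_cond_id = 0
--             else:
--                 sampling_cond_id += 1
--
--
--     return sim_conditions
-- ===== SOURCE B (Python) =====
-- def get_sim_conditions(team_composition_list, dem_strategy_list, sampling_condition_list, N_runs, run_start_id):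
--     L = len(dem_strategy_list)
--     T = len(team_composition_list)
--     S = len(sampling_condition_list)
--     return [[r,
--              team_composition_list[(r // L - run_start_id // L) % T],
--              dem_strategy_list[(r - run_start_id) % L],
--              sampling_condition_list[(r // L - run_start_id // L) % S]]
--             for r in range(run_start_id, run_start_id + N_runs)]
-- ===== Notes on version B (the rewrite author's own statement) =====
-- stated objective: simpler
-- what changed: Replaces the stateful loop with three cyclic counters and reset branches by a single list comprehension computing each row's indices in closed form ((r - start) % L for the strategy, and a floor-division count ((r//L) - (start//L)) % T / % S for the other two).
import Mathlib
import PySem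

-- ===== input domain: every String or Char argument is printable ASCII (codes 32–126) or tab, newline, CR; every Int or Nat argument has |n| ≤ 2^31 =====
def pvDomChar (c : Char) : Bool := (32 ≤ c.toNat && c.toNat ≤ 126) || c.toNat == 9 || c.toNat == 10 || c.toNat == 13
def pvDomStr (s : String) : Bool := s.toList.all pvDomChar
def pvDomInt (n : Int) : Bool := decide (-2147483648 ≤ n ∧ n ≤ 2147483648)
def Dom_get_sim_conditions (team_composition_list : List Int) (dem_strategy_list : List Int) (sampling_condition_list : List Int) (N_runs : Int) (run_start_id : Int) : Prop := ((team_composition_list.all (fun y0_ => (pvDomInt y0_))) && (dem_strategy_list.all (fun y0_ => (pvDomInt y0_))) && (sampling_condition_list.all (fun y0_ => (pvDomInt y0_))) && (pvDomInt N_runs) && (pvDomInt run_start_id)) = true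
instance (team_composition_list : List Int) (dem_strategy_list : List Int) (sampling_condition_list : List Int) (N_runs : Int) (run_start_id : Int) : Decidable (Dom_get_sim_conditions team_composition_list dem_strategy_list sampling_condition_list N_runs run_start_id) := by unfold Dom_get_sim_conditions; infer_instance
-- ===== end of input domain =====

-- B replaces A's three stateful cyclic counters and reset branches by a closed-form
-- per-row index computation inside a single list comprehension (objective: simpler).

-- ===== PORT A =====
-- loop body of A's for-loop: state = (sim_conditions, team_comp_id, dem_strategy_id, sampling_cond_id)
def stepA (team_composition_list dem_strategy_list sampling_condition_list : List Int)
    (st : List (List Int) × Int × Int × Int) (run_id : Int) :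
    List (List Int) × Int × Int × Int :=
  let sims := st.1
  let team_comp_id := st.2.1
  let dem_strategy_id := st.2.2.1
  let sampling_cond_id := st.2.2.2
  let L : Int := dem_strategy_list.length
  let row := [run_id, PySem.List.pyGetD team_composition_list team_comp_id 0,
              PySem.List.pyGetD dem_strategy_list dem_strategy_id 0,
              PySem.List.pyGetD sampling_condition_list sampling_cond_id 0]
  let dem' := if dem_strategy_id = L - 1 then 0 else dem_strategy_id + 1
  let team' := if PySem.Int.mod run_id L = L - 1 then
      (if team_comp_id = (team_composition_list.length : Int) - 1 then 0 else team_comp_id + 1)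
    else team_comp_id
  let samp' := if PySem.Int.mod run_id L = L - 1 then
      (if sampling_cond_id = (sampling_condition_list.length : Int) - 1 then 0 else sampling_cond_id + 1)
    else sampling_cond_id
  (sims ++ [row], team', dem', samp')

def get_sim_conditions (team_composition_list : List Int) (dem_strategy_list : List Int) (sampling_condition_list : List Int) (N_runs : Int) (run_start_id : Int) : List (List Int) :=
  ((PySem.List.pyRange run_start_id (run_start_id + N_runs) 1).foldl
      (stepA team_composition_list dem_strategy_list sampling_condition_list)
      ([], 0, 0, 0)).1

-- ===== PORT B =====
def rowB (team_composition_list dem_strategy_list sampling_condition_list : List Int)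
    (run_start_id r : Int) : List Int :=
  let L : Int := dem_strategy_list.length
  let c : Int := PySem.Int.floordiv r L - PySem.Int.floordiv run_start_id L
  [r, PySem.List.pyGetD team_composition_list (PySem.Int.mod c (team_composition_list.length : Int)) 0,
      PySem.List.pyGetD dem_strategy_list (PySem.Int.mod (r - run_start_id) L) 0,
      PySem.List.pyGetD sampling_condition_list (PySem.Int.mod c (sampling_condition_list.length : Int)) 0]

def get_sim_conditions_alt (team_composition_list : List Int) (dem_strategy_list : List Int) (sampling_condition_list : List Int) (N_runs : Int) (run_start_id : Int) : List (List Int) :=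
  (PySem.List.pyRange run_start_id (run_start_id + N_runs) 1).map
    (rowB team_composition_list dem_strategy_list sampling_condition_list run_start_id)

-- ===== PRECONDITION & SPEC =====
-- Pre_ excludes exactly the inputs where A raises: with a nonempty run range, A indexes all
-- three lists (IndexError on an empty one, and % len(dem_strategy_list) is a ZeroDivisionError).
def Pre_get_sim_conditions (team_composition_list : List Int) (dem_strategy_list : List Int) (sampling_condition_list : List Int) (N_runs : Int) (run_start_id : Int) : Prop :=
  N_runs ≤ 0 ∨ (team_composition_list ≠ [] ∧ dem_strategy_list ≠ [] ∧ sampling_condition_list ≠ [])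
instance (team_composition_list : List Int) (dem_strategy_list : List Int) (sampling_condition_list : List Int) (N_runs : Int) (run_start_id : Int) : Decidable (Pre_get_sim_conditions team_composition_list dem_strategy_list sampling_condition_list N_runs run_start_id) := by unfold Pre_get_sim_conditions; infer_instance

def pvWitness_get_sim_conditions : List Int × List Int × List Int × Int × Int :=
  ([1, 2], [10, 20, 30], [7], 8, 3)

def Spec_get_sim_conditions (team_composition_list : List Int) (dem_strategy_list : List Int) (sampling_condition_list : List Int) (N_runs : Int) (run_start_id : Int) (out : List (List Int)) : Prop := out = get_sim_conditions_alt team_composition_list dem_strategy_list sampling_condition_list N_runs run_start_id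
instance (team_composition_list : List Int) (dem_strategy_list : List Int) (sampling_condition_list : List Int) (N_runs : Int) (run_start_id : Int) (out : List (List Int)) : Decidable (Spec_get_sim_conditions team_composition_list dem_strategy_list sampling_condition_list N_runs run_start_id out) := by unfold Spec_get_sim_conditions; infer_instance

-- ===== CLAIM (what is proved, stated in full; the proofs are below) =====
def Claim_equal_get_sim_conditions : Prop := ∀ (team_composition_list : List Int) (dem_strategy_list : List Int) (sampling_condition_list : List Int) (N_runs : Int) (run_start_id : Int), Dom_get_sim_conditions team_composition_list dem_strategy_list sampling_condition_list N_runs run_start_id → Pre_get_sim_conditions team_composition_list dem_strategy_list sampling_condition_list N_runs run_start_id → Spec_get_sim_conditions team_composition_list dem_strategy_list sampling_condition_list N_runs run_start_id (get_sim_conditions team_composition_list dem_strategy_list sampling_condition_list N_runs run_start_id)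

-- ===== LEMMAS AND PROOFS =====

-- (m+1) % L follows A's reset-or-increment rule
lemma cyc_step (m L : Int) (hL : 0 < L) :
    (if m % L = L - 1 then (0 : Int) else m % L + 1) = (m + 1) % L := by
  have hsplit : m + 1 = (m % L + 1) + L * (m / L) := by
    have := Int.mul_ediv_add_emod m L; omega
  rw [hsplit, Int.add_mul_emod_self_left]
  have h0 : 0 ≤ m % L := Int.emod_nonneg m (by omega)
  have h1 : m % L < L := Int.emod_lt_of_pos m hL
  split_ifs with h
  · rw [h]; simp
  · exact (Int.emod_eq_of_lt (by omega) (by omega)).symm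

-- the floor-division count advances by one exactly when x % L = L - 1
lemma div_step (x L : Int) (hL : 0 < L) :
    (x + 1) / L = x / L + (if x % L = L - 1 then (1 : Int) else 0) := by
  have h0 : 0 ≤ x % L := Int.emod_nonneg x (by omega)
  have h1 : x % L < L := Int.emod_lt_of_pos x hL
  have hsplit : x + 1 = (x % L + 1) + L * (x / L) := by
    have := Int.mul_ediv_add_emod x L; omega
  rw [hsplit, Int.add_mul_ediv_left _ _ (by omega : L ≠ 0)]
  split_ifs with h
  · rw [h]; simp [Int.ediv_self (by omega : L ≠ 0)]; ring
  · rw [Int.ediv_eq_zero_of_lt (by omega) (by omega)]; ring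

lemma invA (tc ds sc : List Int) (hT : 0 < (tc.length : Int)) (hL : 0 < (ds.length : Int))
    (hS : 0 < (sc.length : Int)) (a : Int) (n : Nat) :
    (PySem.List.pyRange a (a + (n : Int)) 1).foldl (stepA tc ds sc) ([], 0, 0, 0)
      = ((PySem.List.pyRange a (a + (n : Int)) 1).map (rowB tc ds sc a),
         ((a + (n : Int)) / (ds.length : Int) - a / (ds.length : Int)) % (tc.length : Int),
         (n : Int) % (ds.length : Int),
         ((a + (n : Int)) / (ds.length : Int) - a / (ds.length : Int)) % (sc.length : Int)) := by
  induction n with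
  | zero =>
      simp [PySem.List.pyRange_one_eq_nil (le_refl a)]
  | succ n ih =>
      have hcast : a + ((n + 1 : Nat) : Int) = (a + (n : Int)) + 1 := by push_cast; ring
      rw [hcast, PySem.List.pyRange_one_succ_right (by omega : a ≤ a + (n : Int)),
          List.foldl_append, List.map_append, ih]
      have hmod : ∀ x : Int, PySem.Int.mod x (ds.length : Int) = x % (ds.length : Int) :=
        fun x => PySem.Int.mod_eq_emod_of_pos hL
      have hmodT : ∀ x : Int, PySem.Int.mod x (tc.length : Int) = x % (tc.length : Int) :=
        fun x => PySem.Int.mod_eq_emod_of_pos hT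
      have hmodS : ∀ x : Int, PySem.Int.mod x (sc.length : Int) = x % (sc.length : Int) :=
        fun x => PySem.Int.mod_eq_emod_of_pos hS
      have hdiv : ∀ x : Int, PySem.Int.floordiv x (ds.length : Int) = x / (ds.length : Int) :=
        fun x => PySem.Int.floordiv_eq_ediv_of_pos hL
      simp only [stepA, rowB, List.foldl_cons, List.foldl_nil, List.map_cons, List.map_nil,
        hmod, hmodT, hmodS, hdiv, Prod.mk.injEq]
      refine ⟨?_, ?_, ?_, ?_⟩
      · -- rows: the appended row is rowB at r = a + n
        have : a + (n : Int) - a = (n : Int) := by ring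
        simp [this]
      · -- team index
        rw [div_step (a + (n : Int)) _ hL]
        split_ifs with h h2
        · have e := cyc_step ((a + (n : Int)) / (ds.length : Int) - a / (ds.length : Int)) (tc.length : Int) hT
          rw [if_pos h2] at e
          rw [show (a + (n : Int)) / (ds.length : Int) + 1 - a / (ds.length : Int) = ((a + (n : Int)) / (ds.length : Int) - a / (ds.length : Int)) + 1 from by ring]
          exact e
        · have e := cyc_step ((a + (n : Int)) / (ds.length : Int) - a / (ds.length : Int)) (tc.length : Int) hT
          rw [if_neg h2] at e
          rw [show (a + (n : Int)) / (ds.length : Int) + 1 - a / (ds.length : Int) = ((a + (n : Int)) / (ds.length : Int) - a / (ds.length : Int)) + 1 from by ring]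
          exact e
        · rw [show (a + (n : Int)) / (ds.length : Int) + 0 - a / (ds.length : Int) = (a + (n : Int)) / (ds.length : Int) - a / (ds.length : Int) from by ring]
      · -- dem index
        have := cyc_step (n : Int) (ds.length : Int) hL
        push_cast
        omega
      · -- sampling index
        rw [div_step (a + (n : Int)) _ hL]
        split_ifs with h h2
        · have e := cyc_step ((a + (n : Int)) / (ds.length : Int) - a / (ds.length : Int)) (sc.length : Int) hS
          rw [if_pos h2] at e
          rw [show (a + (n : Int)) / (ds.length : Int) + 1 - a / (ds.length : Int) = ((a + (n : Int)) / (ds.length : Int) - a / (ds.length : Int)) + 1 from by ring]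
          exact e
        · have e := cyc_step ((a + (n : Int)) / (ds.length : Int) - a / (ds.length : Int)) (sc.length : Int) hS
          rw [if_neg h2] at e
          rw [show (a + (n : Int)) / (ds.length : Int) + 1 - a / (ds.length : Int) = ((a + (n : Int)) / (ds.length : Int) - a / (ds.length : Int)) + 1 from by ring]
          exact e
        · rw [show (a + (n : Int)) / (ds.length : Int) + 0 - a / (ds.length : Int) = (a + (n : Int)) / (ds.length : Int) - a / (ds.length : Int) from by ring]
-- ===== VERDICT (by name: the statement is the Claim_ definition above) =====
theorem get_sim_conditions_spec : Claim_equal_get_sim_conditions := by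
  intro tc ds sc N a _hDom hPre
  unfold Spec_get_sim_conditions get_sim_conditions get_sim_conditions_alt
  by_cases hN : N ≤ 0
  · rw [PySem.List.pyRange_one_eq_nil (by omega : a + N ≤ a)]
    rfl
  · obtain h | ⟨hT, hL, hS⟩ := hPre
    · omega
    have hN' : a + N = a + ((N.toNat : Nat) : Int) := by omega
    rw [hN', invA tc ds sc (by simpa using List.length_pos_iff.mpr hT)
      (by simpa using List.length_pos_iff.mpr hL) (by simpa using List.length_pos_iff.mpr hS) a N.toNat]
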